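-- pv_equiv track=rewrite | github.com/mrSelau/Timeliner | Heuristics/LF/500testes_500eventos/NGraphgenerator.py | geraGrafo
-- ===== SOURCE A (Python) =====
-- def geraGrafo(list_event):
-- 	grafo = ""
-- 	count = 0
-- 	text = ""
-- 	for x in range(0,len(list_event)):
-- 		first = list_event[x][0]
-- 		last = list_event[x][-1]
--
-- 		for y in range(x+1,len(list_event)):
-- 			intersec = set(list_event[x]).intersection(list_event[y])
--
-- 			if (intersec != set()) and (intersec != {first}) and (intersec != {last}):
-- 				count += 1
-- 				text += str(x)+","+str(y)+"\n"
-- 	return text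
-- ===== SOURCE B (Python) =====
-- def geraGrafo(list_event):
--     firsts = [e[0] for e in list_event]
--     lasts = [e[-1] for e in list_event]
--     # inverted index: element value -> increasing list of event indices containing it
--     index = {}
--     for i, e in enumerate(list_event):
--         for v in e:
--             if v not in index:
--                 index[v] = []
--             if i not in index[v]:
--                 index[v].append(i)
--     # candidate pairs: the events listed under some common value
--     pairs = set()
--     for idxs in index.values():
--         for a in range(len(idxs)):
--             for b in range(a + 1, len(idxs)):
--                 pairs.add((idxs[a], idxs[b]))
--     out = []
--     for (x, y) in sorted(pairs):
--         s = set(list_event[x]).intersection(list_event[y])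
--         if s != {firsts[x]} and s != {lasts[x]}:
--             out.append(str(x) + "," + str(y) + "\n")
--     return "".join(out)
-- ===== Notes on version B (the rewrite author's own statement) =====
-- stated objective: alternative
-- what changed: B replaces A's all-pairs nested scan with per-pair set intersections by an inverted index mapping each element value to the events containing it: candidate pairs are read off the index lists, collected in a set, and only those are tested and emitted in sorted order.
import Mathlib
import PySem

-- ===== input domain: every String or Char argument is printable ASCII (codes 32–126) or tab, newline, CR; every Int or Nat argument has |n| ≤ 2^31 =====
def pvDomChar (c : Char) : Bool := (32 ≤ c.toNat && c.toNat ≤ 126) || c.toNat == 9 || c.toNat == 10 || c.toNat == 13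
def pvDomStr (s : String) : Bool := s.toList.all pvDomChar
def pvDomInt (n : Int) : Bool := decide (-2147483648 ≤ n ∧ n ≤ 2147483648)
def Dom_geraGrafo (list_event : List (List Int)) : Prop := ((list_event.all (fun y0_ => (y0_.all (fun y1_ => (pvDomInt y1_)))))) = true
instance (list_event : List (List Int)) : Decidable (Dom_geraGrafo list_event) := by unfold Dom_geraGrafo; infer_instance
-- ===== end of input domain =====

-- B replaces A's all-pairs scan with set intersections by an inverted index (element -> events containing it):
-- candidate pairs are read off the index, collected in a set, and emitted in sorted order; return value only.

-- ===== PORT A =====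
def geraGrafo (list_event : List (List Int)) : String :=
  let _grafo : String := ""
  let st :=
    (PySem.List.pyRange 0 (PySem.List.len list_event) 1).foldl
      (fun (st : Int × String) x =>
        let ev_x := PySem.List.pyGetD list_event x []
        let first := PySem.List.pyGetD ev_x 0 0
        let last := PySem.List.pyGetD ev_x (-1) 0
        (PySem.List.pyRange (x + 1) (PySem.List.len list_event) 1).foldl
          (fun (st : Int × String) y =>
            let intersec := PySem.Set.inter (PySem.Set.ofList ev_x) (PySem.List.pyGetD list_event y [])
            if (!(PySem.Set.equal intersec PySem.Set.empty) &&
                !(PySem.Set.equal intersec (PySem.Set.ofList [first])) &&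
                !(PySem.Set.equal intersec (PySem.Set.ofList [last]))) then
              (st.1 + 1, st.2 ++ PySem.Int.toStr x ++ "," ++ PySem.Int.toStr y ++ "\n")
            else st) st)
      ((0 : Int), "")
  st.2

-- ===== PORT B =====
def geraGrafo_alt (list_event : List (List Int)) : String :=
  let firsts := list_event.map (fun e => PySem.List.pyGetD e 0 0)
  let lasts := list_event.map (fun e => PySem.List.pyGetD e (-1) 0)
  -- inverted index: element value -> increasing list of event indices containing it
  let index : PySem.Dict Int (List Int) :=
    (PySem.List.enumerate list_event).foldl
      (fun d p =>
        p.2.foldl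
          (fun (d : PySem.Dict Int (List Int)) v =>
            let d := if d.contains v then d else d.insert v []
            if (d.getD v []).contains p.1 then d else d.modify v [] (· ++ [p.1])) d)
      PySem.Dict.empty
  -- candidate pairs: the events listed under some common value
  let pairs : PySem.Set (Int × Int) :=
    (PySem.Dict.values index).foldl
      (fun (s : PySem.Set (Int × Int)) idxs =>
        (PySem.List.pyRange 0 (PySem.List.len idxs) 1).foldl
          (fun (s : PySem.Set (Int × Int)) a =>
            (PySem.List.pyRange (a + 1) (PySem.List.len idxs) 1).foldl
              (fun (s : PySem.Set (Int × Int)) b =>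
                PySem.Set.add s (PySem.List.pyGetD idxs a 0, PySem.List.pyGetD idxs b 0)) s) s)
      PySem.Set.empty
  let out :=
    (PySem.List.sorted2 pairs (fun p => p.1) (fun p => p.2)).foldl
      (fun (out : List String) p =>
        let s := PySem.Set.inter (PySem.Set.ofList (PySem.List.pyGetD list_event p.1 []))
                                 (PySem.List.pyGetD list_event p.2 [])
        if (!(PySem.Set.equal s (PySem.Set.ofList [PySem.List.pyGetD firsts p.1 0])) &&
            !(PySem.Set.equal s (PySem.Set.ofList [PySem.List.pyGetD lasts p.1 0]))) then
          out ++ [PySem.Int.toStr p.1 ++ "," ++ PySem.Int.toStr p.2 ++ "\n"]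
        else out) []
  PySem.Str.join "" out

-- ===== PRECONDITION & SPEC =====
-- Pre_ excludes exactly the inputs containing an empty event, on which A (and B) raises IndexError at list_event[x][0].
def Pre_geraGrafo (list_event : List (List Int)) : Prop := ∀ e ∈ list_event, e ≠ []
instance (list_event : List (List Int)) : Decidable (Pre_geraGrafo list_event) := by unfold Pre_geraGrafo; infer_instance
def pvWitness_geraGrafo : List (List Int) := [[1, 2, 3], [3, 4], [2, 9], [5], [1, 3]]

def Spec_geraGrafo (list_event : List (List Int)) (out : String) : Prop := out = geraGrafo_alt list_event
instance (list_event : List (List Int)) (out : String) : Decidable (Spec_geraGrafo list_event out) := by unfold Spec_geraGrafo; infer_instance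

-- ===== CLAIM (what is proved, stated in full; the proofs are below) =====
def Claim_equal_geraGrafo : Prop := ∀ (list_event : List (List Int)), Dom_geraGrafo list_event → Pre_geraGrafo list_event → Spec_geraGrafo list_event (geraGrafo list_event)

-- ===== LEMMAS AND PROOFS =====

def pvEnsure (d : PySem.Dict Int (List Int)) (v : Int) : PySem.Dict Int (List Int) :=
  if d.contains v then d else d.insert v []
def pvStepV (i : Int) (d : PySem.Dict Int (List Int)) (v : Int) : PySem.Dict Int (List Int) :=
  if ((pvEnsure d v).getD v []).contains i then pvEnsure d v else (pvEnsure d v).modify v [] (· ++ [i])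
def pvInnerD (ev : List Int) (i : Int) (d : PySem.Dict Int (List Int)) : PySem.Dict Int (List Int) :=
  ev.foldl (pvStepV i) d

theorem getD_ensure (d : PySem.Dict Int (List Int)) (w v : Int) :
    ((pvEnsure d w).getD v []) = d.getD v [] := by
  unfold pvEnsure; split
  · rfl
  · rename_i h
    rw [PySem.Dict.getD_insert]
    split
    · rename_i hv; subst hv
      exact (PySem.Dict.getD_of_not_contains d [] (by simpa using h)).symm
    · rfl

theorem contains_ensure (d : PySem.Dict Int (List Int)) (w v : Int) :
    ((pvEnsure d w).contains v) = (v == w || d.contains v) := by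
  unfold pvEnsure; split
  · rename_i h
    by_cases hv : v = w
    · subst hv; simp [h]
    · simp [hv]
  · rw [PySem.Dict.contains_insert]

theorem getD_pvStepV (i : Int) (d : PySem.Dict Int (List Int)) (w v : Int) :
    (pvStepV i d w).getD v [] =
      if v = w ∧ i ∉ d.getD w [] then d.getD v [] ++ [i] else d.getD v [] := by
  unfold pvStepV
  simp only [getD_ensure]
  split
  · rename_i h
    rw [List.contains_iff_mem] at h
    rw [getD_ensure]
    have : ¬ (v = w ∧ i ∉ d.getD w []) := by rintro ⟨rfl, hn⟩; exact hn h
    simp [this]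
  · rename_i h
    rw [PySem.Dict.getD_modify]
    have hni : i ∉ d.getD w [] := by simpa [List.contains_iff_mem] using h
    rw [getD_ensure]
    split
    · rename_i hv; simp [hv, hni]
    · rename_i hv; simp [hv, getD_ensure]

theorem contains_pvStepV (i : Int) (d : PySem.Dict Int (List Int)) (w v : Int) :
    (pvStepV i d w).contains v = (v == w || d.contains v) := by
  unfold pvStepV
  split
  · exact contains_ensure d w v
  · rw [PySem.Dict.contains_modify, contains_ensure]
    by_cases hv : v = w <;> simp [hv]


theorem getD_pvInnerD (ev : List Int) (i : Int) (d : PySem.Dict Int (List Int)) (v : Int) :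
    (pvInnerD ev i d).getD v [] =
      if v ∈ ev ∧ i ∉ d.getD v [] then d.getD v [] ++ [i] else d.getD v [] := by
  induction ev generalizing d with
  | nil => simp [pvInnerD]
  | cons w rest ih =>
    show (pvInnerD rest i (pvStepV i d w)).getD v [] = _
    rw [ih]; simp only [getD_pvStepV]
    by_cases hvw : v = w
    · subst hvw
      by_cases hi : i ∈ d.getD v []
      · simp [hi]
      · simp [hi]
    · by_cases hv : v ∈ rest <;> by_cases hi : i ∈ d.getD v [] <;>
        simp [hvw, hv, hi]

theorem contains_pvInnerD (ev : List Int) (i : Int) (d : PySem.Dict Int (List Int)) (v : Int) :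
    (pvInnerD ev i d).contains v = (d.contains v || decide (v ∈ ev)) := by
  induction ev generalizing d with
  | nil => simp [pvInnerD]
  | cons w rest ih =>
    show (pvInnerD rest i (pvStepV i d w)).contains v = _
    rw [ih, contains_pvStepV]
    by_cases hvw : v = w
    · simp [hvw]
    · have hb : (v == w) = false := by simpa using hvw
      simp [hb, hvw]

theorem nodup_keys_pvStepV (i : Int) (d : PySem.Dict Int (List Int)) (w : Int)
    (h : d.keys.Nodup) : (pvStepV i d w).keys.Nodup := by
  have hens : (pvEnsure d w).keys.Nodup := by
    unfold pvEnsure; split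
    · exact h
    · exact PySem.Dict.nodup_keys_insert d w [] h
  unfold pvStepV; split
  · exact hens
  · rw [PySem.Dict.keys_modify]
    exact PySem.Dict.nodup_keys_insert _ _ _ hens

theorem nodup_keys_pvInnerD (ev : List Int) (i : Int) (d : PySem.Dict Int (List Int))
    (h : d.keys.Nodup) : (pvInnerD ev i d).keys.Nodup := by
  induction ev generalizing d with
  | nil => exact h
  | cons w rest ih =>
    exact ih (pvStepV i d w) (nodup_keys_pvStepV i d w h)

theorem getD_pvOuterAux (ls : List (List Int)) (m : Int) (d : PySem.Dict Int (List Int))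
    (hd : ∀ v j, j ∈ d.getD v ([] : List Int) → j < m) (v : Int) :
    (((PySem.List.enumerate ls m).foldl (fun d p => pvInnerD p.2 p.1 d) d).getD v []) =
      d.getD v [] ++ ((PySem.List.enumerate ls m).filter (fun q => decide (v ∈ q.2))).map (·.1) := by
  induction ls generalizing m d with
  | nil => simp [PySem.List.enumerate_nil]
  | cons e rest ih =>
    rw [PySem.List.enumerate_cons]
    rw [List.foldl_cons]
    have hstep : ∀ u, (pvInnerD e m d).getD u [] =
        d.getD u [] ++ (if u ∈ e then [m] else []) := by
      intro u
      rw [getD_pvInnerD]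
      have : m ∉ d.getD u [] := fun h => absurd (hd u m h) (lt_irrefl m)
      by_cases hu : u ∈ e <;> simp [hu, this]
    have hd' : ∀ u j, j ∈ (pvInnerD e m d).getD u ([] : List Int) → j < m + 1 := by
      intro u j hj
      rw [hstep] at hj
      rcases List.mem_append.mp hj with h | h
      · exact lt_trans (hd u j h) (by omega)
      · split at h
        · simp at h; omega
        · simp at h
    rw [ih (m+1) _ hd', hstep]
    by_cases hv : v ∈ e <;> simp [hv]

theorem contains_pvOuterAux (ls : List (List Int)) (m : Int) (d : PySem.Dict Int (List Int)) (v : Int) :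
    ((PySem.List.enumerate ls m).foldl (fun d p => pvInnerD p.2 p.1 d) d).contains v =
      (d.contains v || ls.any (fun e => decide (v ∈ e))) := by
  induction ls generalizing m d with
  | nil => simp [PySem.List.enumerate_nil]
  | cons e rest ih =>
    rw [PySem.List.enumerate_cons, List.foldl_cons, ih, contains_pvInnerD]
    simp [Bool.or_assoc]

def pvDict (le : List (List Int)) : PySem.Dict Int (List Int) :=
  (PySem.List.enumerate le).foldl (fun d p => pvInnerD p.2 p.1 d) PySem.Dict.empty

def pvOcc (le : List (List Int)) (v : Int) : List Int :=
  ((PySem.List.enumerate le).filter (fun q => decide (v ∈ q.2))).map (·.1)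

theorem nodup_keys_pvDict (le : List (List Int)) : (pvDict le).keys.Nodup := by
  unfold pvDict
  have : ∀ (l : List (Int × List Int)) (d : PySem.Dict Int (List Int)), d.keys.Nodup →
      (l.foldl (fun d p => pvInnerD p.2 p.1 d) d).keys.Nodup := by
    intro l
    induction l with
    | nil => intro d h; exact h
    | cons p rest ih => intro d h; exact ih _ (nodup_keys_pvInnerD p.2 p.1 d h)
  exact this _ _ PySem.Dict.nodup_keys_empty

theorem getD_pvDict (le : List (List Int)) (v : Int) :
    (pvDict le).getD v [] = pvOcc le v := by
  unfold pvDict pvOcc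
  rw [getD_pvOuterAux le 0 PySem.Dict.empty (by simp [PySem.Dict.getD_empty]) v]
  simp [PySem.Dict.getD_empty]

theorem contains_pvDict (le : List (List Int)) (v : Int) :
    (pvDict le).contains v = le.any (fun e => decide (v ∈ e)) := by
  unfold pvDict
  rw [contains_pvOuterAux]
  simp [PySem.Dict.contains_empty]

theorem get?_pvDict (le : List (List Int)) (v : Int) (h : le.any (fun e => decide (v ∈ e)) = true) :
    (pvDict le).get? v = some (pvOcc le v) := by
  have hc : (pvDict le).contains v = true := by rw [contains_pvDict, h]
  rw [PySem.Dict.contains_eq_isSome_get?] at hc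
  obtain ⟨w, hw⟩ := Option.isSome_iff_exists.mp hc
  have := PySem.Dict.getD_eq_get?_getD (pvDict le) v ([] : List Int)
  rw [getD_pvDict, hw] at this
  simp at this
  rw [hw, this]

theorem mem_values_pvDict (le : List (List Int)) (L : List Int) :
    L ∈ (pvDict le).values ↔ ∃ v, (pvDict le).get? v = some L := by
  constructor
  · intro h
    simp only [PySem.Dict.values, List.mem_map] at h
    obtain ⟨⟨k, w⟩, hmem, hw⟩ := h
    subst hw
    exact ⟨k, PySem.Dict.get?_of_mem_items _ hmem (nodup_keys_pvDict le)⟩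
  · rintro ⟨v, hv⟩
    have := PySem.Dict.mem_items_of_get?_eq_some _ hv
    simp only [PySem.Dict.values, List.mem_map]
    exact ⟨(v, L), this, rfl⟩

theorem pairwise_pvOcc (le : List (List Int)) (v : Int) :
    (pvOcc le v).Pairwise (· < ·) := by
  unfold pvOcc
  rw [List.pairwise_map]
  exact List.Pairwise.filter _ (PySem.List.pairwise_lt_enumerate le 0)

theorem mem_pvOcc (le : List (List Int)) (v x : Int) :
    x ∈ pvOcc le v ↔ ∃ k : Nat, k < le.length ∧ x = (k : Int) ∧ v ∈ le[k]! := by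
  unfold pvOcc
  simp only [List.mem_map, List.mem_filter, PySem.List.mem_enumerate_iff]
  constructor
  · rintro ⟨⟨a, b⟩, ⟨⟨k, hk, heq⟩, hvb⟩, hx⟩
    simp at heq
    obtain ⟨ha, hb⟩ := heq
    refine ⟨k, hk, by simp [← hx, ha], ?_⟩
    rw [getElem!_pos le k hk, ← hb]
    simpa using hvb
  · rintro ⟨k, hk, hx, hv⟩
    refine ⟨((k : Int), le[k]), ⟨⟨k, hk, by simp⟩, ?_⟩, by simp [hx]⟩
    rw [getElem!_pos le k hk] at hv
    simpa using hv

def pvPairsList (L : List Int) : List (Int × Int) :=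
  (PySem.List.pyRange 0 (PySem.List.len L) 1).flatMap
    (fun a => (PySem.List.pyRange (a + 1) (PySem.List.len L) 1).map
      (fun b => (PySem.List.pyGetD L a 0, PySem.List.pyGetD L b 0)))

def pvPairs (le : List (List Int)) : PySem.Set (Int × Int) :=
  (PySem.Dict.values (pvDict le)).foldl
    (fun (s : PySem.Set (Int × Int)) idxs =>
      (PySem.List.pyRange 0 (PySem.List.len idxs) 1).foldl
        (fun (s : PySem.Set (Int × Int)) a =>
          (PySem.List.pyRange (a + 1) (PySem.List.len idxs) 1).foldl
            (fun (s : PySem.Set (Int × Int)) b =>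
              PySem.Set.add s (PySem.List.pyGetD idxs a 0, PySem.List.pyGetD idxs b 0)) s) s)
    PySem.Set.empty

theorem foldl_update {α β : Type} [BEq α] (l : List β) (g : β → List α) (s : PySem.Set α) :
    l.foldl (fun s x => PySem.Set.update s (g x)) s = PySem.Set.update s (l.flatMap g) := by
  induction l generalizing s with
  | nil => simp [PySem.Set.update]
  | cons a t ih =>
    rw [List.foldl_cons, ih, List.flatMap_cons, PySem.Set.update_append]

theorem pvPairs_eq_ofList (le : List (List Int)) :
    pvPairs le = PySem.Set.ofList ((pvDict le).values.flatMap pvPairsList) := by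
  unfold pvPairs
  have hin : ∀ (idxs : List Int) (s : PySem.Set (Int × Int)),
      (PySem.List.pyRange 0 (PySem.List.len idxs) 1).foldl
        (fun (s : PySem.Set (Int × Int)) a =>
          (PySem.List.pyRange (a + 1) (PySem.List.len idxs) 1).foldl
            (fun (s : PySem.Set (Int × Int)) b =>
              PySem.Set.add s (PySem.List.pyGetD idxs a 0, PySem.List.pyGetD idxs b 0)) s) s
      = PySem.Set.update s (pvPairsList idxs) := by
    intro idxs s
    have h1 : ∀ (a : Int) (s : PySem.Set (Int × Int)),
        (PySem.List.pyRange (a + 1) (PySem.List.len idxs) 1).foldl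
          (fun (s : PySem.Set (Int × Int)) b =>
            PySem.Set.add s (PySem.List.pyGetD idxs a 0, PySem.List.pyGetD idxs b 0)) s
        = PySem.Set.update s ((PySem.List.pyRange (a + 1) (PySem.List.len idxs) 1).map
            (fun b => (PySem.List.pyGetD idxs a 0, PySem.List.pyGetD idxs b 0))) := by
      intro a s
      rw [PySem.Set.update_map_eq_foldl_add]
    calc _ = (PySem.List.pyRange 0 (PySem.List.len idxs) 1).foldl
              (fun (s : PySem.Set (Int × Int)) a => PySem.Set.update s
                ((PySem.List.pyRange (a + 1) (PySem.List.len idxs) 1).map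
                  (fun b => (PySem.List.pyGetD idxs a 0, PySem.List.pyGetD idxs b 0)))) s := by
            exact PySem.List.foldl_congr_mem _ _ _ _ (fun s a _ => h1 a s)
      _ = _ := by rw [foldl_update]; rfl
  calc _ = ((pvDict le).values).foldl
            (fun (s : PySem.Set (Int × Int)) idxs => PySem.Set.update s (pvPairsList idxs))
            PySem.Set.empty := by
          exact PySem.List.foldl_congr_mem _ _ _ _ (fun s idxs _ => hin idxs s)
    _ = _ := by rw [foldl_update]; exact PySem.Set.update_nil_left _

theorem mem_pvPairsList (L : List Int) (p : Int × Int) :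
    p ∈ pvPairsList L ↔ ∃ a b : Nat, a < b ∧ b < L.length ∧ p = (L[a]!, L[b]!) := by
  unfold pvPairsList
  simp only [List.mem_flatMap, List.mem_map, PySem.List.mem_pyRange_one, PySem.List.len_eq]
  constructor
  · rintro ⟨a, ⟨ha0, haL⟩, b, ⟨hb0, hbL⟩, hp⟩
    refine ⟨a.toNat, b.toNat, by omega, by omega, ?_⟩
    rw [← hp, PySem.List.pyGetD_eq_getElem L 0 ha0 haL, PySem.List.pyGetD_eq_getElem L 0 (by omega) hbL]
    rw [getElem!_pos L a.toNat (by omega), getElem!_pos L b.toNat (by omega)]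
  · rintro ⟨a, b, hab, hbL, hp⟩
    refine ⟨(a : Int), ⟨by omega, by omega⟩, (b : Int), ⟨by omega, by omega⟩, ?_⟩
    rw [hp, PySem.List.pyGetD_eq_getElem L 0 (by omega) (by exact_mod_cast (by omega : (a:Int) < L.length)),
        PySem.List.pyGetD_eq_getElem L 0 (by omega) (by exact_mod_cast (by omega : (b:Int) < L.length))]
    rw [getElem!_pos L a (by omega), getElem!_pos L b (by omega)]
    simp

theorem mem_pvPairs (le : List (List Int)) (p : Int × Int) :
    p ∈ pvPairs le ↔ ∃ k l : Nat, k < l ∧ l < le.length ∧ p = ((k : Int), (l : Int)) ∧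
      ∃ v, v ∈ le[k]! ∧ v ∈ le[l]! := by
  rw [pvPairs_eq_ofList, PySem.Set.mem_ofList, List.mem_flatMap]
  constructor
  · rintro ⟨L, hL, hp⟩
    obtain ⟨v, hv⟩ := (mem_values_pvDict le L).mp hL
    -- L is pvOcc le v
    have hvocc : le.any (fun e => decide (v ∈ e)) = true := by
      by_contra hno
      have : (pvDict le).contains v = false := by
        rw [contains_pvDict]; exact Bool.not_eq_true _ ▸ (by simpa using hno)
      rw [PySem.Dict.contains_eq_isSome_get?, hv] at this
      simp at this
    have hL' : L = pvOcc le v := by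
      have := get?_pvDict le v hvocc
      rw [hv] at this; exact (Option.some_inj.mp this)
    subst hL'
    obtain ⟨a, b, hab, hbL, hpe⟩ := (mem_pvPairsList _ p).mp hp
    have hpw := pairwise_pvOcc le v
    rw [List.pairwise_iff_getElem] at hpw
    have hlt : (pvOcc le v)[a]! < (pvOcc le v)[b]! := by
      rw [getElem!_pos _ a (by omega), getElem!_pos _ b hbL]
      exact hpw a b (by omega) hbL hab
    have hma : (pvOcc le v)[a]! ∈ pvOcc le v := by
      rw [getElem!_pos _ a (by omega)]; exact List.getElem_mem _
    have hmb : (pvOcc le v)[b]! ∈ pvOcc le v := by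
      rw [getElem!_pos _ b hbL]; exact List.getElem_mem _
    obtain ⟨k, hk, hka, hvk⟩ := (mem_pvOcc le v _).mp hma
    obtain ⟨l, hl, hlb, hvl⟩ := (mem_pvOcc le v _).mp hmb
    refine ⟨k, l, ?_, hl, by rw [hpe, hka, hlb], v, hvk, hvl⟩
    have : (k : Int) < (l : Int) := by rw [← hka, ← hlb]; exact hlt
    omega
  · rintro ⟨k, l, hkl, hl, hpe, v, hvk, hvl⟩
    have hvocc : le.any (fun e => decide (v ∈ e)) = true := by
      apply List.any_eq_true.mpr
      refine ⟨le[k]!, ?_, by simpa using hvk⟩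
      rw [getElem!_pos le k (by omega)]; exact List.getElem_mem _
    refine ⟨pvOcc le v, ?_, ?_⟩
    · exact (mem_values_pvDict le _).mpr ⟨v, get?_pvDict le v hvocc⟩
    · apply (mem_pvPairsList _ p).mpr
      have hmk : ((k : Nat) : Int) ∈ pvOcc le v := (mem_pvOcc le v _).mpr ⟨k, by omega, rfl, hvk⟩
      have hml : ((l : Nat) : Int) ∈ pvOcc le v := (mem_pvOcc le v _).mpr ⟨l, hl, rfl, hvl⟩
      obtain ⟨a, ha, hka⟩ := List.mem_iff_getElem.mp hmk
      obtain ⟨b, hb, hlb⟩ := List.mem_iff_getElem.mp hml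
      have hpw := pairwise_pvOcc le v
      rw [List.pairwise_iff_getElem] at hpw
      have hab : a < b := by
        rcases lt_trichotomy a b with h | h | h
        · exact h
        · exfalso; subst h; rw [hka] at hlb; omega
        · exfalso; have := hpw b a hb ha h; rw [hka, hlb] at this; omega
      refine ⟨a, b, hab, hb, ?_⟩
      rw [hpe, getElem!_pos _ a ha, getElem!_pos _ b hb, hka, hlb]

def pvInter (le : List (List Int)) (x y : Int) : PySem.Set Int :=
  PySem.Set.inter (PySem.Set.ofList (PySem.List.pyGetD le x [])) (PySem.List.pyGetD le y [])

def pvNE (le : List (List Int)) (x y : Int) : Bool :=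
  !(PySem.Set.equal (pvInter le x y) PySem.Set.empty)

def pvT (le : List (List Int)) : List (Int × Int) :=
  (PySem.List.pyRange 0 (PySem.List.len le) 1).flatMap
    (fun x => ((PySem.List.pyRange (x + 1) (PySem.List.len le) 1).filter
        (fun y => pvNE le x y)).map (fun y => (x, y)))

theorem pvNE_iff (le : List (List Int)) (x y : Int) (hx0 : 0 ≤ x) (hx : x < (le.length : Int))
    (hy0 : 0 ≤ y) (hy : y < (le.length : Int)) :
    pvNE le x y = true ↔ ∃ v, v ∈ le[x.toNat]! ∧ v ∈ le[y.toNat]! := by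
  unfold pvNE pvInter
  rw [PySem.List.pyGetD_eq_getElem le ([] : List Int) hx0 hx,
      PySem.List.pyGetD_eq_getElem le ([] : List Int) hy0 hy]
  rw [Bool.not_eq_eq_eq_not, Bool.not_true, ← Bool.not_eq_true, PySem.Set.equal_iff]
  push Not
  constructor
  · rintro ⟨v, hv⟩
    rcases hv with ⟨hmem, _⟩ | ⟨_, hemp⟩
    · rw [PySem.Set.mem_inter, PySem.Set.mem_ofList] at hmem
      exact ⟨v, by rw [getElem!_pos le x.toNat (by omega)]; exact hmem.1,
               by rw [getElem!_pos le y.toNat (by omega)]; exact hmem.2⟩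
    · exact absurd hemp (by simp [PySem.Set.empty])
  · rintro ⟨v, hv1, hv2⟩
    rw [getElem!_pos le x.toNat (by omega)] at hv1
    rw [getElem!_pos le y.toNat (by omega)] at hv2
    exact ⟨v, by simp [PySem.Set.mem_inter, PySem.Set.mem_ofList, PySem.Set.empty, hv1, hv2]⟩

theorem mem_pvT (le : List (List Int)) (p : Int × Int) :
    p ∈ pvT le ↔ ∃ k l : Nat, k < l ∧ l < le.length ∧ p = ((k : Int), (l : Int)) ∧
      ∃ v, v ∈ le[k]! ∧ v ∈ le[l]! := by
  unfold pvT
  simp only [List.mem_flatMap, List.mem_map, List.mem_filter, PySem.List.mem_pyRange_one,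
    PySem.List.len_eq]
  constructor
  · rintro ⟨x, ⟨hx0, hxn⟩, y, ⟨⟨hy1, hyn⟩, hne⟩, hp⟩
    obtain ⟨v, hv⟩ := (pvNE_iff le x y hx0 hxn (by omega) hyn).mp hne
    exact ⟨x.toNat, y.toNat, by omega, by omega, by simp [← hp]; constructor <;> omega, v, hv⟩
  · rintro ⟨k, l, hkl, hl, hp, v, hv⟩
    refine ⟨(k : Int), ⟨by omega, by omega⟩, (l : Int), ⟨⟨by omega, by omega⟩, ?_⟩, hp.symm⟩
    apply (pvNE_iff le (k : Int) (l : Int) (by omega) (by omega) (by omega) (by omega)).mpr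
    simp only [Int.toNat_natCast]
    exact ⟨v, hv⟩

theorem pairwise_lex_pvT (le : List (List Int)) :
    (pvT le).Pairwise (fun p q => toLex p < toLex q) := by
  unfold pvT
  rw [List.flatMap_def, List.pairwise_flatten]
  constructor
  · intro l hl
    rw [List.mem_map] at hl
    obtain ⟨x, _, hx⟩ := hl
    subst hx
    rw [List.pairwise_map]
    apply List.Pairwise.imp (fun {a b} (h : a < b) => ?_)
      (List.Pairwise.filter _ (PySem.List.pairwise_lt_pyRange_one _ _))
    rw [Prod.Lex.toLex_lt_toLex]
    right; exact ⟨rfl, h⟩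
  · rw [List.pairwise_map]
    apply List.Pairwise.imp ?_ (PySem.List.pairwise_lt_pyRange_one 0 _)
    rintro x x' hxx p hp q hq
    rw [List.mem_map] at hp hq
    obtain ⟨y, _, rfl⟩ := hp
    obtain ⟨y', _, rfl⟩ := hq
    rw [Prod.Lex.toLex_lt_toLex]
    left; exact hxx

theorem nodup_pvT (le : List (List Int)) : (pvT le).Nodup := by
  refine List.Pairwise.imp ?_ (pairwise_lex_pvT le)
  intro p q h he
  subst he
  exact lt_irrefl _ h

theorem sorted2_eq_sorted_toLex (xs : List (Int × Int)) :
    PySem.List.sorted2 xs (fun p => p.1) (fun p => p.2) =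
      PySem.List.sorted xs (fun p => toLex p) := by
  have hb : (fun (a b : Int × Int) => (decide (a.1 < b.1) || (!decide (b.1 < a.1) && decide (a.2 < b.2))))
      = fun (a b : Int × Int) => decide ((toLex a : Lex (Int × Int)) < toLex b) := by
    funext a b
    rw [Bool.eq_iff_iff]
    simp only [Bool.or_eq_true, Bool.and_eq_true, Bool.not_eq_true', decide_eq_true_eq,
      decide_eq_false_iff_not, Prod.Lex.toLex_lt_toLex]
    omega
  show xs.foldl (fun acc x => PySem.List.insertBy _ x acc) [] = xs.foldl (fun acc x => PySem.List.insertBy _ x acc) []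
  rw [hb]

theorem sorted_pvPairs (le : List (List Int)) :
    PySem.List.sorted2 (pvPairs le) (fun p => p.1) (fun p => p.2) = pvT le := by
  rw [sorted2_eq_sorted_toLex]
  apply PySem.List.sorted_eq_of_perm_of_pairwise_lt
  · apply (List.perm_ext_iff_of_nodup (nodup_pvT le) ?_).mpr
    · intro p
      rw [mem_pvT, mem_pvPairs]
    · rw [pvPairs_eq_ofList]
      exact PySem.Set.nodup_ofList _
  · exact pairwise_lex_pvT le

def pvEnd (le : List (List Int)) (x y : Int) : Bool :=
  !(PySem.Set.equal (pvInter le x y)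
      (PySem.Set.ofList [PySem.List.pyGetD (PySem.List.pyGetD le x []) 0 0])) &&
  !(PySem.Set.equal (pvInter le x y)
      (PySem.Set.ofList [PySem.List.pyGetD (PySem.List.pyGetD le x []) (-1) 0]))

def pvCondA (le : List (List Int)) (x y : Int) : Bool :=
  let ex := PySem.List.pyGetD le x []
  let first := PySem.List.pyGetD ex 0 0
  let last := PySem.List.pyGetD ex (-1) 0
  let intersec := PySem.Set.inter (PySem.Set.ofList ex) (PySem.List.pyGetD le y [])
  !(PySem.Set.equal intersec PySem.Set.empty) &&
  !(PySem.Set.equal intersec (PySem.Set.ofList [first])) &&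
  !(PySem.Set.equal intersec (PySem.Set.ofList [last]))

theorem condA_split (le : List (List Int)) (x y : Int) :
    pvCondA le x y = (pvNE le x y && pvEnd le x y) := by
  simp [pvCondA, pvNE, pvEnd, pvInter, Bool.and_assoc]

def pvP (le : List (List Int)) (p : Int × Int) : Bool :=
  !(PySem.Set.equal (pvInter le p.1 p.2)
      (PySem.Set.ofList [PySem.List.pyGetD (le.map (fun e => PySem.List.pyGetD e 0 0)) p.1 0])) &&
  !(PySem.Set.equal (pvInter le p.1 p.2)
      (PySem.Set.ofList [PySem.List.pyGetD (le.map (fun e => PySem.List.pyGetD e (-1) 0)) p.1 0]))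

def pvLine (x y : Int) : String := PySem.Int.toStr x ++ "," ++ PySem.Int.toStr y ++ "\n"

def pvCat (ls : List String) : String := ls.foldr (· ++ ·) ""

theorem pvP_eq_pvEnd (le : List (List Int)) (p : Int × Int) (hp : p ∈ pvT le) :
    pvP le p = pvEnd le p.1 p.2 := by
  obtain ⟨k, l, hkl, hl, hpe, -⟩ := (mem_pvT le p).mp hp
  subst hpe
  unfold pvP pvEnd
  have hk : (k : Int) < (le.length : Int) := by omega
  rw [PySem.List.pyGetD_eq_getElem (le.map (fun e => PySem.List.pyGetD e 0 0)) 0 (by omega)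
        (by rw [List.length_map]; exact hk),
      PySem.List.pyGetD_eq_getElem (le.map (fun e => PySem.List.pyGetD e (-1) 0)) 0 (by omega)
        (by rw [List.length_map]; exact hk),
      List.getElem_map, List.getElem_map,
      PySem.List.pyGetD_eq_getElem le ([] : List Int) (by omega) hk]

-- A in flat form
theorem A_filter_split (le : List (List Int)) (x : Int) (l : List Int) :
    l.filter (fun y => pvCondA le x y) =
      (l.filter (fun y => pvNE le x y)).filter (fun y => pvEnd le x y) := by
  rw [List.filter_filter]
  apply List.filter_congr
  intro y _
  rw [condA_split, Bool.and_comm]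

theorem T_filter (le : List (List Int)) :
    ((pvT le).filter (fun p => pvEnd le p.1 p.2)).map (fun p => pvLine p.1 p.2) =
      (PySem.List.pyRange 0 (PySem.List.len le) 1).flatMap
        (fun x => ((PySem.List.pyRange (x + 1) (PySem.List.len le) 1).filter
          (fun y => pvCondA le x y)).map (fun y => pvLine x y)) := by
  unfold pvT
  rw [List.filter_flatMap, List.map_flatMap]
  apply List.flatMap_congr
  intro x _
  rw [List.filter_map, List.map_map]
  rw [show ((fun p : Int × Int => pvEnd le p.1 p.2) ∘ (fun y => (x, y))) = fun y => pvEnd le x y from rfl]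
  rw [show ((fun p : Int × Int => pvLine p.1 p.2) ∘ (fun y => (x, y))) = fun y => pvLine x y from rfl]
  rw [← A_filter_split]

theorem pvCat_nil : pvCat [] = "" := rfl
theorem pvCat_cons (s : String) (ls : List String) : pvCat (s :: ls) = s ++ pvCat ls := rfl

theorem pvCat_append (a b : List String) : pvCat (a ++ b) = pvCat a ++ pvCat b := by
  induction a with
  | nil => simp [pvCat_nil]
  | cons s t ih => simp [pvCat_cons, ih, String.append_assoc]

theorem pvCat_flatten (ls : List (List String)) : pvCat ls.flatten = pvCat (ls.map pvCat) := by
  induction ls with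
  | nil => rfl
  | cons a t ih => simp [List.flatten_cons, pvCat_append, pvCat_cons, ih]

theorem flatten_intersperse_nil (l : List (List Char)) :
    (List.intersperse ([] : List Char) l).flatten = l.flatten := by
  induction l with
  | nil => rfl
  | cons a t ih =>
    cases t with
    | nil => rfl
    | cons b t2 => simp_all [List.intersperse]

theorem ofList_flatten (ls : List String) :
    String.ofList ((ls.map String.toList).flatten) = pvCat ls := by
  induction ls with
  | nil => rfl
  | cons s t ih => simp [pvCat_cons, String.ofList_append, ih]

theorem pvCat_join (ls : List String) : PySem.Str.join "" ls = pvCat ls := by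
  simp only [PySem.Str.join, PySem.Chars.join, List.intercalate]
  rw [show ("" : String).toList = [] from rfl, flatten_intersperse_nil, ofList_flatten]

theorem innerA (c : Int → Bool) (x : Int) (l : List Int) (st : Int × String) :
    (l.foldl (fun (st : Int × String) y =>
        if c y then (st.1 + 1, st.2 ++ PySem.Int.toStr x ++ "," ++ PySem.Int.toStr y ++ "\n") else st) st).2
      = st.2 ++ pvCat ((l.filter c).map (fun y => pvLine x y)) := by
  induction l generalizing st with
  | nil => simp [pvCat_nil]
  | cons a l ih =>
    rw [List.foldl_cons, ih]
    by_cases h : c a <;>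
      simp [h, pvLine, pvCat_cons, String.append_assoc]

theorem outerA (le : List (List Int)) (l : List Int) (st : Int × String) :
    (l.foldl (fun (st : Int × String) x =>
      (PySem.List.pyRange (x + 1) (PySem.List.len le) 1).foldl
        (fun (st : Int × String) y =>
          if pvCondA le x y then (st.1 + 1, st.2 ++ PySem.Int.toStr x ++ "," ++ PySem.Int.toStr y ++ "\n") else st) st) st).2
    = st.2 ++ pvCat (l.map (fun x => pvCat (((PySem.List.pyRange (x + 1) (PySem.List.len le) 1).filter
        (fun y => pvCondA le x y)).map (fun y => pvLine x y)))) := by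
  induction l generalizing st with
  | nil => simp [pvCat_nil]
  | cons a l ih =>
    rw [List.foldl_cons, ih, innerA]
    simp [pvCat_cons, String.append_assoc]

theorem A_canon (le : List (List Int)) :
    geraGrafo le = pvCat ((PySem.List.pyRange 0 (PySem.List.len le) 1).map
      (fun x => pvCat (((PySem.List.pyRange (x + 1) (PySem.List.len le) 1).filter
        (fun y => pvCondA le x y)).map (fun y => pvLine x y)))) := by
  have h := outerA le (PySem.List.pyRange 0 (PySem.List.len le) 1) ((0 : Int), "")
  simp only [String.empty_append] at h
  exact h

theorem A_flat (le : List (List Int)) :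
    geraGrafo le = pvCat (((pvT le).filter (fun p => pvEnd le p.1 p.2)).map
      (fun p => pvLine p.1 p.2)) := by
  rw [A_canon, T_filter, List.flatMap_def, pvCat_flatten, List.map_map]
  rfl

theorem B_flat (le : List (List Int)) :
    geraGrafo_alt le = pvCat (((pvT le).filter (fun p => pvP le p)).map
      (fun p => pvLine p.1 p.2)) := by
  have h0 : geraGrafo_alt le = PySem.Str.join ""
      ((PySem.List.sorted2 (pvPairs le) (fun p => p.1) (fun p => p.2)).foldl
        (fun (out : List String) p => if pvP le p then out ++ [pvLine p.1 p.2] else out) []) := rfl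
  rw [h0, PySem.List.foldl_append_if, List.nil_append, pvCat_join, sorted_pvPairs]

theorem main_eq (le : List (List Int)) : geraGrafo le = geraGrafo_alt le := by
  rw [A_flat, B_flat]
  refine congrArg pvCat (congrArg (List.map _) (List.filter_congr (fun p hp => ?_)))
  exact (pvP_eq_pvEnd le p hp).symm

-- ===== VERDICT (by name: the statement is the Claim_ definition above) =====
theorem geraGrafo_spec : Claim_equal_geraGrafo := by
  intro le _ _
  unfold Spec_geraGrafo
  exact main_eq le
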